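-- pv_equiv track=rewrite | github.com/back/USACO | Season/2021.01/Silver2-1.py | check
-- ===== SOURCE A (Python) =====
-- def check(x):
--     chs = sorted(set(x))
--     s = '-' + x + '-'
--     t = 0
--     while chs:
--         c = chs.pop()
--         sp = [i for i in s.split(c) if i]
--         t += len(sp) - 1
--         if chs:
--             s = s.replace(c, '')
--     return t
-- ===== SOURCE B (Python) =====
-- def check(x):
--     # Minimum number of strokes, via a single pass with a monotonic stack.
--     # A new stroke starts at a character unless the nearest previous
--     # character of height <= it has the same height.
--     stack = []
--     strokes = 0
--     for ch in x:
--         while stack and stack[-1] > ch: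
--             stack.pop()
--         if not stack or stack[-1] != ch:
--             stack.append(ch)
--             strokes += 1
--     return strokes
-- ===== Notes on version B (the rewrite author's own statement) =====
-- stated objective: alternative
-- what changed: A repeatedly re-splits and rewrites a shrinking sentinel-wrapped copy of the string, one pass per distinct character; B makes a single left-to-right pass with a monotonic stack, counting a stroke exactly where no equal-height character is visible. Pre_ restricts to strings without '-': A uses '-' as an out-of-band sentinel, so '-' as a data character collides with it and yields accidental counts (even -1 on "-"), outside the function's natural alphanumeric USACO domain.
-- outside the precondition, e.g. on check('-a'): A returns 0, B returns 2; on check('-'): A returns -1, B returns 1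
import Mathlib
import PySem

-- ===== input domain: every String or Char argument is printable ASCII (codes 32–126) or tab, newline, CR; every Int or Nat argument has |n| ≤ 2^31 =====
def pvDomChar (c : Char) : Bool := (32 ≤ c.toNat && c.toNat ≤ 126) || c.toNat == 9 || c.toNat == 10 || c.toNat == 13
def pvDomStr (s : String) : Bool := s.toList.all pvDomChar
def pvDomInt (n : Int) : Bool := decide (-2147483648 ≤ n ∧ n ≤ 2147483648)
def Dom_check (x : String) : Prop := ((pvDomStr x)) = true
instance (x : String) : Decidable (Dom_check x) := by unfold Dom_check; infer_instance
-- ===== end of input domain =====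

-- B replaces A's per-character split-and-rewrite rounds by one monotonic-stack pass over the string;
-- Pre_ restricts to strings without '-', A's internal sentinel character.

-- ===== PORT A =====
-- A's 'while chs: c = chs.pop(); …' pops from the END of sorted(set(x)), so it walks the
-- sorted distinct characters back to front: ported as structural recursion over its reverse.
def checkLoop : List Char → List Char → Int → Int
  | [], _, t => t
  | c :: rest, s, t =>
      let sp := (PySem.Chars.splitOn s [c]).filter (fun i => !i.isEmpty)
      let t' := t + (sp.length : Int) - 1
      checkLoop rest (if rest.isEmpty then s else PySem.Chars.replace s [c] []) t'

def check (x : String) : Int :=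
  checkLoop (PySem.List.sorted (PySem.Set.ofList x.toList) (fun c => c) false).reverse
    ('-' :: x.toList ++ ['-']) 0

-- ===== PORT B =====
-- 'while stack and stack[-1] > ch: stack.pop()' (stack head = Python's stack[-1])
def popGT (a : Char) : List Char → List Char
  | [] => []
  | v :: rest => if a < v then popGT a rest else v :: rest

-- one iteration of Source B's for-loop: pop larger, then push-and-count unless the top is equal
def stepB (acc : List Char × Int) (ch : Char) : List Char × Int :=
  match popGT ch acc.1 with
  | [] => (ch :: [], acc.2 + 1)
  | v :: rest => if v = ch then (v :: rest, acc.2) else (ch :: v :: rest, acc.2 + 1)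

def check_alt (x : String) : Int := (x.toList.foldl stepB ([], 0)).2

-- ===== PRECONDITION & SPEC =====
-- Pre_ excludes strings containing '-' although A returns on them: A wraps the input in '-' sentinels,
-- so a '-' data character collides with the sentinel and the returned count is an accident of that
-- implementation detail (check "-" = -1, check "-a" = 0), outside the natural alphanumeric USACO domain.
def Pre_check (x : String) : Prop := '-' ∉ x.toList
instance (x : String) : Decidable (Pre_check x) := by unfold Pre_check; infer_instance
def pvWitness_check : String := "aba"
def Spec_check (x : String) (out : Int) : Prop := out = check_alt x
instance (x : String) (out : Int) : Decidable (Spec_check x out) := by unfold Spec_check; infer_instance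

-- ===== CLAIM (what is proved, stated in full; the proofs are below) =====
def Claim_equal_check : Prop := ∀ (x : String), Dom_check x → Pre_check x → Spec_check x (check x)

-- ===== LEMMAS AND PROOFS =====

-- number of maximal non-c blocks (b = currently inside such a block) and the end flag
def nrun (c : Char) : Bool → List Char → Nat
  | _, [] => 0
  | b, a :: l => if a = c then nrun c false l else (if b then 0 else 1) + nrun c true l

def nflag (c : Char) : Bool → List Char → Bool
  | b, [] => b
  | _, a :: l => nflag c (!(a == c)) l

-- number of maximal c-blocks (b = currently inside a c-block)
def runCnt (c : Char) : Bool → List Char → Nat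
  | _, [] => 0
  | b, a :: l => if a = c then (if b then 0 else 1) + runCnt c true l else runCnt c false l

lemma nrun_runCnt (c : Char) :
    ∀ (M : List Char) (b : Bool),
      nrun c b M + (if nflag c b M then 0 else 1)
        = runCnt c (!b) M + (if b then 0 else 1) := by
  intro M
  induction M with
  | nil => intro b; cases b <;> simp [nrun, nflag, runCnt]
  | cons a l ih =>
    intro b
    by_cases hac : a = c
    · subst hac
      have h := ih false
      cases b <;> simp [nrun, nflag, runCnt] at h ⊢ <;> omega
    · have h := ih true
      have hbc : (a == c) = false := by simp [hac]
      cases b <;> simp [nrun, nflag, runCnt, hac, hbc] at h ⊢ <;> omega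

lemma nrun_append_single (c d : Char) (hdc : d ≠ c) :
    ∀ (M : List Char) (b : Bool),
      nrun c b (M ++ [d]) = nrun c b M + (if nflag c b M then 0 else 1) := by
  intro M
  induction M with
  | nil => intro b; cases b <;> simp [nrun, nflag, hdc]
  | cons a l ih =>
    intro b
    by_cases hac : a = c
    · subst hac; simp [nrun, nflag, ih]
    · have hbc : (a == c) = false := by simp [hac]
      cases b <;> simp [nrun, nflag, hac, hbc, ih] <;> omega

-- A's per-character count with both sentinels present is the c-block count of the data
lemma nrun_sentinel (c : Char) (hc : c ≠ '-') (M : List Char) :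
    nrun c false ('-' :: M ++ ['-']) = runCnt c false M + 1 := by
  have h1 : nrun c false ('-' :: M ++ ['-']) = 1 + nrun c true (M ++ ['-']) := by
    simp [nrun, Ne.symm hc]
  have h2 := nrun_append_single c '-' (Ne.symm hc) M true
  have h3 := nrun_runCnt c M true
  simp at h3
  omega

def psplit (c : Char) : List Char → List (List Char)
  | [] => [[]]
  | a :: l => if a = c then [] :: psplit c l else (psplit c l).modifyHead (a :: ·)

lemma psplit_shape (c : Char) : ∀ l, ∃ h tl, psplit c l = h :: tl := by
  intro l
  induction l with
  | nil => exact ⟨[], [], rfl⟩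
  | cons a l ih =>
    obtain ⟨h, tl, e⟩ := ih
    by_cases hac : a = c
    · exact ⟨[], psplit c l, by simp [psplit, hac]⟩
    · exact ⟨a :: h, tl, by simp [psplit, hac, e]⟩

lemma splitOn_go_single (c : Char) :
    ∀ (fuel : Nat) (l cur : List Char) (acc : List (List Char)), l.length ≤ fuel →
      PySem.Chars.splitOn.go [c] fuel l cur acc
        = acc.reverse ++ (psplit c l).modifyHead (cur.reverse ++ ·) := by
  intro fuel
  induction fuel with
  | zero =>
    intro l cur acc h
    have hl : l = [] := by cases l <;> simp_all
    subst hl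
    simp [PySem.Chars.splitOn.go, psplit]
  | succ n ih =>
    intro l cur acc h
    cases l with
    | nil => simp [PySem.Chars.splitOn.go, psplit]
    | cons a l' =>
      by_cases hac : a = c
      · subst hac
        rw [show PySem.Chars.splitOn.go [a] (n+1) (a :: l') cur acc
              = PySem.Chars.splitOn.go [a] n l' [] (cur.reverse :: acc) by
            simp [PySem.Chars.splitOn.go, List.isPrefixOf]]
        rw [ih l' [] (cur.reverse :: acc) (by simpa using h)]
        obtain ⟨hd, tl, e⟩ := psplit_shape a l'
        simp [psplit, e]
      · rw [show PySem.Chars.splitOn.go [c] (n+1) (a :: l') cur acc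
              = PySem.Chars.splitOn.go [c] n l' (a :: cur) acc by
            simp [PySem.Chars.splitOn.go, List.isPrefixOf, Ne.symm hac]]
        rw [ih l' (a :: cur) acc (by simpa using h)]
        obtain ⟨hd, tl, e⟩ := psplit_shape c l'
        simp [psplit, hac, e]

lemma splitOn_single (s : List Char) (c : Char) :
    PySem.Chars.splitOn s [c] = psplit c s := by
  rw [PySem.Chars.splitOn, splitOn_go_single c (s.length + 1) s [] [] (by omega)]
  obtain ⟨hd, tl, e⟩ := psplit_shape c s
  simp [e]

lemma filter_psplit (c : Char) :
    ∀ (l p : List Char),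
      (((psplit c l).modifyHead (p ++ ·)).filter (fun i => !i.isEmpty)).length
        = if p.isEmpty then nrun c false l else nrun c true l + 1 := by
  intro l
  induction l with
  | nil => intro p; cases p <;> simp [psplit, nrun]
  | cons a l ih =>
    intro p
    by_cases hac : a = c
    · subst hac
      have h0 := ih []
      obtain ⟨hd, tl, e⟩ := psplit_shape a l
      rw [e] at h0
      simp only [List.modifyHead_cons, List.nil_append, List.isEmpty_nil, if_pos] at h0
      rw [show psplit a (a :: l) = [] :: (hd :: tl) from by simp [psplit, e]]
      simp only [List.modifyHead_cons, List.append_nil]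
      cases p with
      | nil => simpa [nrun] using h0
      | cons q p' =>
        simp only [List.filter_cons] at h0 ⊢
        simp only [nrun]
        simp at h0 ⊢
        omega
    · obtain ⟨hd, tl, e⟩ := psplit_shape c l
      have h1 := ih (p ++ [a])
      rw [e] at h1
      simp only [List.modifyHead_cons] at h1
      rw [if_neg (by simp)] at h1
      rw [show psplit c (a :: l) = (a :: hd) :: tl from by simp [psplit, hac, e]]
      simp only [List.modifyHead_cons]
      rw [show p ++ a :: hd = (p ++ [a]) ++ hd from by simp, h1]
      cases p <;> simp [nrun, hac] <;> omega

lemma length_filter_splitOn (s : List Char) (c : Char) :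
    ((PySem.Chars.splitOn s [c]).filter (fun i => !i.isEmpty)).length = nrun c false s := by
  rw [splitOn_single]
  have h := filter_psplit c s []
  obtain ⟨hd, tl, e⟩ := psplit_shape c s
  rw [e] at h ⊢
  simpa using h

lemma replace_go_single (c : Char) :
    ∀ (fuel : Nat) (l acc : List Char), l.length ≤ fuel →
      PySem.Chars.replace.go [c] [] fuel l acc
        = acc.reverse ++ l.filter (fun a => !(a == c)) := by
  intro fuel
  induction fuel with
  | zero =>
    intro l acc h
    have hl : l = [] := by cases l <;> simp_all
    subst hl
    simp [PySem.Chars.replace.go]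
  | succ n ih =>
    intro l acc h
    cases l with
    | nil => simp [PySem.Chars.replace.go]
    | cons a l' =>
      by_cases hac : a = c
      · subst hac
        rw [show PySem.Chars.replace.go [a] [] (n+1) (a :: l') acc
              = PySem.Chars.replace.go [a] [] n l' acc by
            simp [PySem.Chars.replace.go, List.isPrefixOf]]
        rw [ih l' acc (by simpa using h)]
        simp
      · rw [show PySem.Chars.replace.go [c] [] (n+1) (a :: l') acc
              = PySem.Chars.replace.go [c] [] n l' (a :: acc) by
            simp [PySem.Chars.replace.go, List.isPrefixOf, Ne.symm hac]]
        rw [ih l' (a :: acc) (by simpa using h)]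
        simp [hac]

lemma replace_single (s : List Char) (c : Char) :
    PySem.Chars.replace s [c] [] = s.filter (fun a => !(a == c)) := by
  rw [PySem.Chars.replace]
  simp only [List.isEmpty_cons, Bool.false_eq_true]
  simpa using replace_go_single c s.length s [] (le_refl _)

lemma loopA_eq (x : List Char) :
    ∀ (l₂ l₁ : List Char) (t : Int),
      (l₁ ++ l₂).Pairwise (fun p q => q < p) →
      (∀ a ∈ x, a ∈ l₁ ++ l₂) → (∀ c ∈ l₂, c ∈ x) → l₂.Nodup →
      checkLoop l₂ (('-' :: x ++ ['-']).filter (fun a => decide (a ∈ l₂ ∨ a ∉ x))) t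
        = t + (l₂.map (fun c =>
            (nrun c false (('-' :: x ++ ['-']).filter (fun a => decide (a ≤ c ∨ a ∉ x))) : Int) - 1)).sum := by
  intro l₂
  induction l₂ with
  | nil => intro l₁ t _ _ _ _; simp [checkLoop]
  | cons c l ih =>
    intro l₁ t hpair hcompl hsound hnd
    have hcx : c ∈ x := hsound c List.mem_cons_self
    have hpcl : (c :: l).Pairwise (fun p q => q < p) := (List.pairwise_append.mp hpair).2.1
    have hl1 : ∀ p ∈ l₁, ∀ q ∈ c :: l, q < p := (List.pairwise_append.mp hpair).2.2
    have hnotc : c ∉ l := (List.nodup_cons.mp hnd).1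
    have hfceq : ('-' :: x ++ ['-']).filter (fun a => decide (a ∈ c :: l ∨ a ∉ x))
        = ('-' :: x ++ ['-']).filter (fun a => decide (a ≤ c ∨ a ∉ x)) := by
      apply List.filter_congr
      intro a _
      by_cases hax : a ∈ x
      · simp only [hax, not_true_eq_false, or_false, decide_eq_decide]
        constructor
        · intro hmem
          rcases List.mem_cons.mp hmem with h | h
          · exact h ▸ le_refl c
          · exact le_of_lt ((List.pairwise_cons.mp hpcl).1 a h)
        · intro hle
          rcases hcompl a hax |> List.mem_append.mp with h | h
          · exact absurd (lt_of_lt_of_le (hl1 a h c List.mem_cons_self) hle) (lt_irrefl c)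
          · exact h
      · simp [hax]
    have hsp : ((PySem.Chars.splitOn (('-' :: x ++ ['-']).filter (fun a => decide (a ∈ c :: l ∨ a ∉ x))) [c]).filter
        (fun i => !i.isEmpty)).length
        = nrun c false (('-' :: x ++ ['-']).filter (fun a => decide (a ≤ c ∨ a ∉ x))) := by
      rw [length_filter_splitOn, hfceq]
    rw [show checkLoop (c :: l) (('-' :: x ++ ['-']).filter (fun a => decide (a ∈ c :: l ∨ a ∉ x))) t
          = checkLoop l
              (if l.isEmpty then (('-' :: x ++ ['-']).filter (fun a => decide (a ∈ c :: l ∨ a ∉ x)))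
               else PySem.Chars.replace (('-' :: x ++ ['-']).filter (fun a => decide (a ∈ c :: l ∨ a ∉ x))) [c] [])
              (t + ((((PySem.Chars.splitOn (('-' :: x ++ ['-']).filter (fun a => decide (a ∈ c :: l ∨ a ∉ x))) [c]).filter
                (fun i => !i.isEmpty)).length : Int)) - 1) from rfl]
    rw [hsp]
    cases l with
    | nil =>
      simp only [checkLoop, List.map_cons, List.map_nil,
        List.sum_cons, List.sum_nil]
      ring
    | cons c' l' =>
      simp only [List.isEmpty_cons, Bool.false_eq_true]
      rw [replace_single]
      have hchain : (('-' :: x ++ ['-']).filter (fun a => decide (a ∈ c :: c' :: l' ∨ a ∉ x))).filter (fun a => !(a == c))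
          = ('-' :: x ++ ['-']).filter (fun a => decide (a ∈ c' :: l' ∨ a ∉ x)) := by
        rw [List.filter_filter]
        apply List.filter_congr
        intro a _
        by_cases hax : a = c
        · subst hax
          simp [hnotc, hcx]
        · by_cases haxx : a ∈ x <;> simp [hax, haxx, List.mem_cons]
      rw [hchain]
      simp only [if_false]
      have hpair' : ((l₁ ++ [c]) ++ (c' :: l')).Pairwise (fun p q => q < p) := by
        rw [List.append_assoc]; exact hpair
      have hcompl' : ∀ a ∈ x, a ∈ (l₁ ++ [c]) ++ (c' :: l') := by
        intro a ha; rw [List.append_assoc]; exact hcompl a ha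
      rw [ih (l₁ ++ [c]) _ hpair' hcompl'
        (fun d hd => hsound d (List.mem_cons_of_mem _ hd)) (List.nodup_cons.mp hnd).2]
      simp only [List.map_cons, List.sum_cons]
      ring

-- ===== B-side lemmas: the monotonic stack =====

-- "a run of c is open" seen from stack st: the first stack element ≤ c equals c
def inRun (c : Char) (st : List Char) : Bool := st.find? (fun v => v ≤ c) == some c

lemma find?_popGT (a : Char) : ∀ (st : List Char),
    st.find? (fun v => v ≤ a) = (popGT a st).head? := by
  intro st
  induction st with
  | nil => simp [popGT]
  | cons v rest ih =>
    by_cases hv : v ≤ a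
    · have hnlt : ¬ a < v := not_lt.mpr hv
      simp [popGT, hnlt, List.find?, hv]
    · have hlt : a < v := not_le.mp hv
      simp [popGT, hlt, List.find?, hv, ih]

lemma inRun_popGT (a c : Char) (h : ¬ a ≤ c) : ∀ (st : List Char),
    inRun c (popGT a st) = inRun c st := by
  intro st
  induction st with
  | nil => simp [popGT]
  | cons v rest ih =>
    by_cases hlt : a < v
    · have hv : ¬ v ≤ c := fun hvc => h (le_of_lt (lt_of_lt_of_le hlt hvc))
      simp [popGT, hlt, inRun, List.find?, hv] at ih ⊢
      exact ih
    · simp [popGT, hlt]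

lemma popGT_pairwise (a : Char) : ∀ (st : List Char),
    st.Pairwise (fun p q => q < p) → (popGT a st).Pairwise (fun p q => q < p) := by
  intro st
  induction st with
  | nil => intro _; simp [popGT]
  | cons v rest ih =>
    intro hp
    by_cases hlt : a < v
    · simpa [popGT, hlt] using ih (List.pairwise_cons.mp hp).2
    · simpa [popGT, hlt] using hp

lemma popGT_le (a : Char) : ∀ (st : List Char) (v : Char) (rest : List Char),
    popGT a st = v :: rest → v ≤ a := by
  intro st
  induction st with
  | nil => intro v rest h; simp [popGT] at h
  | cons w rst ih =>
    intro v rest h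
    by_cases hlt : a < w
    · exact ih v rest (by simpa [popGT, hlt] using h)
    · simp [popGT, hlt] at h
      exact h.1 ▸ not_lt.mp hlt

-- everything the induction step needs to know about one iteration of B
lemma step_spec (st : List Char) (t : Int) (a : Char)
    (hsort : st.Pairwise (fun p q => q < p)) :
    ∃ st'' added, stepB (st, t) a = (st'', t + added) ∧
      st''.Pairwise (fun p q => q < p) ∧
      added = (if inRun a st then (0 : Int) else 1) ∧
      inRun a st'' = true ∧
      (∀ c, c ≠ a → a ≤ c → inRun c st'' = false) ∧
      (∀ c, ¬ a ≤ c → inRun c st'' = inRun c st) := by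
  have hpop := popGT_pairwise a st hsort
  have hfind : inRun a st = ((popGT a st).head? == some a) := by
    simp [inRun, find?_popGT]
  cases hpg : popGT a st with
  | nil =>
    rw [hpg] at hfind hpop
    refine ⟨[a], 1, by simp [stepB, hpg], by simp, by rw [hfind]; simp, ?_, ?_, ?_⟩
    · simp [inRun, List.find?]
    · intro c hca hle
      simp [inRun, List.find?, hle, Ne.symm hca]
    · intro c hle
      rw [← inRun_popGT a c hle st, hpg]
      simp [inRun, List.find?, fun h : a ≤ c => hle h]
  | cons v rest =>
    have hva : v ≤ a := popGT_le a st v rest hpg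
    rw [hpg] at hfind hpop
    by_cases hveq : v = a
    · refine ⟨v :: rest, 0, by simp [stepB, hpg, hveq], hpop, by rw [hfind, hveq]; simp, ?_, ?_, ?_⟩
      · simp [inRun, List.find?, hveq]
      · intro c hca hle
        have hvc : v ≤ c := hveq ▸ hle
        simp [inRun, List.find?, hveq, hle, Ne.symm hca]
      · intro c hle
        rw [← inRun_popGT a c hle st, hpg]
    · have hvlt : v < a := lt_of_le_of_ne hva hveq
      have hsort2 : (a :: v :: rest).Pairwise (fun p q => q < p) := by
        rw [List.pairwise_cons]
        refine ⟨?_, hpop⟩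
        intro b hb
        rcases List.mem_cons.mp hb with h | h
        · exact h ▸ hvlt
        · exact lt_trans ((List.pairwise_cons.mp hpop).1 b h) hvlt
      refine ⟨a :: v :: rest, 1, by simp [stepB, hpg]; simp [hveq], hsort2,
        by rw [hfind]; simp [hveq], ?_, ?_, ?_⟩
      · simp [inRun, List.find?]
      · intro c hca hle
        simp [inRun, List.find?, hle, Ne.symm hca]
      · intro c hle
        rw [← inRun_popGT a c hle st, hpg]
        simp [inRun, List.find?, fun h : a ≤ c => hle h]

lemma sum_split (a : Char) (f g : Char → Int) (d : Int) :
    ∀ (S : List Char), S.Nodup → a ∈ S → (d + f a = g a) → (∀ c ∈ S, c ≠ a → f c = g c) →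
      (S.map g).sum = d + (S.map f).sum := by
  intro S
  induction S with
  | nil => intro _ ha; simp at ha
  | cons s S ih =>
    intro hnd ha hfa hother
    rcases List.mem_cons.mp ha with h | h
    · subst h
      have hrest : ∀ c ∈ S, g c = f c := fun c hc =>
        (hother c (List.mem_cons_of_mem _ hc) (fun he => (List.nodup_cons.mp hnd).1 (he ▸ hc))).symm
      rw [List.map_cons, List.map_cons, List.sum_cons, List.sum_cons,
        List.map_congr_left hrest, ← hfa]
      ring
    · have hsa : s ≠ a := fun he => (List.nodup_cons.mp hnd).1 (he ▸ h)
      rw [List.map_cons, List.map_cons, List.sum_cons, List.sum_cons,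
        ih (List.nodup_cons.mp hnd).2 h hfa (fun c hc => hother c (List.mem_cons_of_mem _ hc)),
        hother s List.mem_cons_self hsa]
      ring

lemma foldB_eq (S : List Char) (hS : S.Nodup) :
    ∀ (l st : List Char) (t : Int), st.Pairwise (fun p q => q < p) → (∀ a ∈ l, a ∈ S) →
      (l.foldl stepB (st, t)).2
        = t + (S.map (fun c => (runCnt c (inRun c st) (l.filter (fun v => decide (v ≤ c))) : Int))).sum := by
  intro l
  induction l with
  | nil =>
    intro st t _ _
    simp [runCnt]
  | cons a l ih =>
    intro st t hsort hmem
    have haS : a ∈ S := hmem a List.mem_cons_self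
    obtain ⟨st'', added, hstep, hsort'', hadd, hina, hself, hother⟩ := step_spec st t a hsort
    rw [List.foldl_cons, hstep, ih st'' (t + added) hsort'' (fun b hb => hmem b (List.mem_cons_of_mem _ hb))]
    have hsum := sum_split a
      (fun c => (runCnt c (inRun c st'') (l.filter (fun v => decide (v ≤ c))) : Int))
      (fun c => (runCnt c (inRun c st) ((a :: l).filter (fun v => decide (v ≤ c))) : Int))
      added S hS haS ?_ ?_
    · rw [hsum]; ring
    · have hfc : (a :: l).filter (fun v => decide (v ≤ a)) = a :: l.filter (fun v => decide (v ≤ a)) := by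
        simp [List.filter_cons]
      have hrc : runCnt a (inRun a st) (a :: l.filter (fun v => decide (v ≤ a)))
            = (if inRun a st then 0 else 1) + runCnt a true (l.filter (fun v => decide (v ≤ a))) := by
        simp [runCnt]
      simp only [hfc, hina, hadd, hrc]
      cases hia : inRun a st <;> simp
    · intro c _ hca
      have hac : a ≠ c := fun he => hca he.symm
      by_cases hle : a ≤ c
      · have hfc : (a :: l).filter (fun v => decide (v ≤ c)) = a :: l.filter (fun v => decide (v ≤ c)) := by
          simp [List.filter_cons, hle]
        have hrc : runCnt c (inRun c st) (a :: l.filter (fun v => decide (v ≤ c)))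
              = runCnt c false (l.filter (fun v => decide (v ≤ c))) := by simp [runCnt, hac]
        simp only [hfc, hrc, hself c hca hle]
      · have hfc : (a :: l).filter (fun v => decide (v ≤ c)) = l.filter (fun v => decide (v ≤ c)) := by
          simp [List.filter_cons, hle]
        simp only [hfc, hother c hle]

-- ===== VERDICT (by name: the statement is the Claim_ definition above) =====
theorem check_spec : Claim_equal_check := by
  intro x _ hpre
  show check x = check_alt x
  set L := x.toList with hL
  set S := PySem.Set.ofList L with hSdef
  set R := (PySem.List.sorted S (fun c => c) false).reverse with hR
  have hdash : '-' ∉ L := hpre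
  have hsorted : (PySem.List.sorted S (fun c => c) false).Pairwise (· < ·) :=
    PySem.List.sorted_ofList_pairwise_lt L
  have hpR : R.Pairwise (fun p q => q < p) := by
    rw [hR, List.pairwise_reverse]; exact hsorted
  have hmemR : ∀ a : Char, a ∈ R ↔ a ∈ L := by
    intro a; rw [hR, List.mem_reverse, PySem.List.mem_sorted, hSdef, PySem.Set.mem_ofList]
  have hndR : R.Nodup := hpR.imp (fun h => ne_of_gt h)
  have hinit : ('-' :: L ++ ['-']).filter (fun a => decide (a ∈ R ∨ a ∉ L)) = ('-' :: L ++ ['-']) := by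
    apply List.filter_eq_self.mpr
    intro a ha
    by_cases hax : a ∈ L
    · simp [(hmemR a).mpr hax]
    · simp [hax]
  have hA : check x = 0 + (R.map (fun c =>
      (nrun c false (('-' :: L ++ ['-']).filter (fun a => decide (a ≤ c ∨ a ∉ L))) : Int) - 1)).sum := by
    have h0 := loopA_eq L R [] 0 (by simpa using hpR) (fun a ha => by simpa using (hmemR a).mpr ha)
      (fun d hd => (hmemR d).mp hd) hndR
    rw [hinit] at h0
    rw [check, ← hL, ← hSdef, ← hR]
    exact h0
  -- simplify A's per-character term on dash-free input
  have hterm : ∀ c ∈ R,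
      (nrun c false (('-' :: L ++ ['-']).filter (fun a => decide (a ≤ c ∨ a ∉ L))) : Int) - 1
        = (runCnt c false (L.filter (fun v => decide (v ≤ c))) : Int) := by
    intro c hc
    have hcL : c ∈ L := (hmemR c).mp hc
    have hcd : c ≠ '-' := fun he => hdash (he ▸ hcL)
    have hfe : ('-' :: L ++ ['-']).filter (fun a => decide (a ≤ c ∨ a ∉ L))
        = '-' :: L.filter (fun v => decide (v ≤ c)) ++ ['-'] := by
      rw [show ('-' :: L ++ ['-']) = '-' :: (L ++ ['-']) from rfl]
      rw [List.filter_cons, List.filter_append]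
      rw [if_pos (by simp [hdash])]
      rw [List.filter_congr (fun a ha => by simp [ha] : ∀ a ∈ L,
        (decide (a ≤ c ∨ a ∉ L)) = decide (a ≤ c))]
      simp [hdash]
    rw [hfe, nrun_sentinel c hcd]
    push_cast
    ring
  have hB : check_alt x = 0 + (S.map (fun c =>
      (runCnt c false (L.filter (fun v => decide (v ≤ c))) : Int))).sum := by
    rw [check_alt, ← hL]
    rw [foldB_eq S (hSdef ▸ PySem.Set.nodup_ofList L) L [] 0 (by simp)
      (fun a ha => by rw [hSdef, PySem.Set.mem_ofList]; exact ha)]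
    simp [inRun]
  rw [hA, hB, List.map_congr_left hterm]
  have hperm : R.Perm S := by
    rw [hR]
    exact (List.reverse_perm _).trans (PySem.List.sorted_perm _ _ _)
  exact congrArg (0 + ·) ((hperm.map _).sum_eq)
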